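-- pv_equiv track=rewrite | github.com/sophiehospel/Assignments-Enpicom | Assignment 1/main.py | max_matching
-- ===== SOURCE A (Python) =====
-- def max_matching(sequence):
--     """
--     Calculates the maximum amount of matching possibilities. This is
--     calculated by the count of appearance of each nucleotide. The nucleotides
--     A and U are multiplied and G and C are multiplied. This output is multiplied
--     with each other. This is the maximum amount of matching possibilities.
--     :param sequence: Sequence found in Fasta file as String.
--     :return result: Amount of possibilities A-U & G-C matches as Integer.
--     """
--
--     amount_a = 0
--     amount_u = 0
--     amount_g = 0
--     amount_c = 0
--
--     for nucleotide in sequence: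
--         if nucleotide.upper() == 'A':
--             amount_a += 1
--         elif nucleotide.upper() == 'U':
--             amount_u += 1
--         elif nucleotide.upper() == 'G':
--             amount_g += 1
--         elif nucleotide.upper() == 'C':
--             amount_c += 1
--
--     a_to_u = amount_a * amount_u
--     g_to_c = amount_g * amount_c
--
--     result = a_to_u * g_to_c
--
--     return result
-- ===== SOURCE B (Python) =====
-- def max_matching(sequence):
--     def counts(lo, hi):
--         # divide-and-conquer: count 4-tuple for sequence[lo:hi]
--         if hi - lo <= 1:
--             if hi - lo == 0:
--                 return (0, 0, 0, 0)
--             ch = sequence[lo].upper()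
--             if ch == 'A':
--                 return (1, 0, 0, 0)
--             elif ch == 'U':
--                 return (0, 1, 0, 0)
--             elif ch == 'G':
--                 return (0, 0, 1, 0)
--             elif ch == 'C':
--                 return (0, 0, 0, 1)
--             return (0, 0, 0, 0)
--         mid = lo + (hi - lo) // 2
--         a1, u1, g1, c1 = counts(lo, mid)
--         a2, u2, g2, c2 = counts(mid, hi)
--         return (a1 + a2, u1 + u2, g1 + g2, c1 + c2)
--
--     a, u, g, c = counts(0, len(sequence))
--     return (a * u) * (g * c)
-- ===== Notes on version B (the rewrite author's own statement) =====
-- stated objective: alternative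
-- what changed: Replaces A's single left-to-right if/elif accumulator loop with a divide-and-conquer recursion that splits the sequence at the midpoint, computes the four-count tuple of each half recursively, and merges halves by componentwise addition before taking the closed-form product.
import Mathlib
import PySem

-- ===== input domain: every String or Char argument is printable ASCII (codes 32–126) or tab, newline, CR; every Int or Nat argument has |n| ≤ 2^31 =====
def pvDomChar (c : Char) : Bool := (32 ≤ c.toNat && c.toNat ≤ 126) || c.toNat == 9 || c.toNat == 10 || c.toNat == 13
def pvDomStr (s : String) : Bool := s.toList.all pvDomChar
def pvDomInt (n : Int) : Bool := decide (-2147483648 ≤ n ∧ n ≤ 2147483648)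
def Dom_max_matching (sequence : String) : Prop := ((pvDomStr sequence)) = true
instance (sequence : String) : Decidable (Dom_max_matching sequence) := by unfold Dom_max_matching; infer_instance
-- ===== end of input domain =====

-- B replaces A's one-pass if/elif accumulator loop by a divide-and-conquer recursion:
-- split at the midpoint, count each half recursively, merge by componentwise addition (alternative decomposition, same O(n) cost).
-- ===== PORT A =====
def max_matching (sequence : String) : Int :=
  let st := sequence.toList.foldl
    (fun (st : Int × Int × Int × Int) nucleotide =>
      let (amount_a, amount_u, amount_g, amount_c) := st
      if PySem.Chars.upperChar nucleotide == 'A' then (amount_a + 1, amount_u, amount_g, amount_c)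
      else if PySem.Chars.upperChar nucleotide == 'U' then (amount_a, amount_u + 1, amount_g, amount_c)
      else if PySem.Chars.upperChar nucleotide == 'G' then (amount_a, amount_u, amount_g + 1, amount_c)
      else if PySem.Chars.upperChar nucleotide == 'C' then (amount_a, amount_u, amount_g, amount_c + 1)
      else (amount_a, amount_u, amount_g, amount_c))
    (0, 0, 0, 0)
  let (amount_a, amount_u, amount_g, amount_c) := st
  (amount_a * amount_u) * (amount_g * amount_c)

-- ===== PORT B =====
-- `counts lo hi` of Source B operates on the slice sequence[lo:hi]; it is ported as a
-- recursion on that slice as a List Char (take/drop at the same midpoint).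
def pvBCounts (l : List Char) : Int × Int × Int × Int :=
  if _h : l.length ≤ 1 then
    match l with
    | [] => (0, 0, 0, 0)
    | ch :: _ =>
      if PySem.Chars.upperChar ch == 'A' then (1, 0, 0, 0)
      else if PySem.Chars.upperChar ch == 'U' then (0, 1, 0, 0)
      else if PySem.Chars.upperChar ch == 'G' then (0, 0, 1, 0)
      else if PySem.Chars.upperChar ch == 'C' then (0, 0, 0, 1)
      else (0, 0, 0, 0)
  else
    let mid := l.length / 2
    let (a1, u1, g1, c1) := pvBCounts (l.take mid)
    let (a2, u2, g2, c2) := pvBCounts (l.drop mid)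
    (a1 + a2, u1 + u2, g1 + g2, c1 + c2)
termination_by l.length
decreasing_by
  · simp only [List.length_take]; omega
  · simp only [List.length_drop]; omega

def max_matching_alt (sequence : String) : Int :=
  let (a, u, g, c) := pvBCounts sequence.toList
  (a * u) * (g * c)

-- ===== PRECONDITION & SPEC =====
def Spec_max_matching (sequence : String) (out : Int) : Prop := out = max_matching_alt sequence
instance (sequence : String) (out : Int) : Decidable (Spec_max_matching sequence out) := by unfold Spec_max_matching; infer_instance

-- ===== CLAIM (what is proved, stated in full; the proofs are below) =====
def Claim_equal_max_matching : Prop := ∀ (sequence : String), Dom_max_matching sequence → Spec_max_matching sequence (max_matching sequence)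

-- ===== LEMMAS AND PROOFS =====

theorem pvBCounts_eq_aux :
    ∀ (n : Nat) (l : List Char), l.length ≤ n →
    pvBCounts l =
      ((l.countP (fun x => PySem.Chars.upperChar x == 'A') : Int),
       (l.countP (fun x => PySem.Chars.upperChar x == 'U') : Int),
       (l.countP (fun x => PySem.Chars.upperChar x == 'G') : Int),
       (l.countP (fun x => PySem.Chars.upperChar x == 'C') : Int)) := by
  intro n
  induction n with
  | zero =>
    intro l hl
    have hnil : l = [] := List.eq_nil_of_length_eq_zero (Nat.le_zero.mp hl)
    subst hnil; simp [pvBCounts]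
  | succ n ih =>
    intro l hl
    by_cases h1 : l.length ≤ 1
    · rcases l with _ | ⟨ch, tl⟩
      · simp [pvBCounts]
      · have htl : tl = [] := by
          simp only [List.length_cons] at h1
          exact List.eq_nil_of_length_eq_zero (by omega)
        subst htl
        rw [pvBCounts]
        simp only [List.length_cons, List.length_nil]
        split_ifs <;> simp_all
    · rw [pvBCounts, dif_neg h1]
      have h2 : (l.take (l.length / 2)).length ≤ n := by
        simp only [List.length_take]; omega
      have h3 : (l.drop (l.length / 2)).length ≤ n := by
        simp only [List.length_drop]; omega
      have hsplit := List.take_append_drop (l.length / 2) l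
      conv_rhs => rw [← hsplit]
      simp only [ih _ h2, ih _ h3, List.countP_append, Nat.cast_add]

theorem pvBCounts_eq (l : List Char) :
    pvBCounts l =
      ((l.countP (fun x => PySem.Chars.upperChar x == 'A') : Int),
       (l.countP (fun x => PySem.Chars.upperChar x == 'U') : Int),
       (l.countP (fun x => PySem.Chars.upperChar x == 'G') : Int),
       (l.countP (fun x => PySem.Chars.upperChar x == 'C') : Int)) :=
  pvBCounts_eq_aux l.length l (le_refl _)

theorem fold_counts (l : List Char) :
    ∀ (a u g c : Int),
      l.foldl
        (fun (st : Int × Int × Int × Int) nucleotide =>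
          let (amount_a, amount_u, amount_g, amount_c) := st
          if PySem.Chars.upperChar nucleotide == 'A' then (amount_a + 1, amount_u, amount_g, amount_c)
          else if PySem.Chars.upperChar nucleotide == 'U' then (amount_a, amount_u + 1, amount_g, amount_c)
          else if PySem.Chars.upperChar nucleotide == 'G' then (amount_a, amount_u, amount_g + 1, amount_c)
          else if PySem.Chars.upperChar nucleotide == 'C' then (amount_a, amount_u, amount_g, amount_c + 1)
          else (amount_a, amount_u, amount_g, amount_c)) (a, u, g, c)
      = (a + (l.countP (fun x => PySem.Chars.upperChar x == 'A') : Int),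
         u + (l.countP (fun x => PySem.Chars.upperChar x == 'U') : Int),
         g + (l.countP (fun x => PySem.Chars.upperChar x == 'G') : Int),
         c + (l.countP (fun x => PySem.Chars.upperChar x == 'C') : Int)) := by
  induction l with
  | nil => intro a u g c; simp
  | cons h t ih =>
    intro a u g c
    simp only [List.foldl_cons, List.countP_cons]
    split_ifs with h1 h2 h3 h4 <;> simp_all <;> ring

-- ===== VERDICT (by name: the statement is the Claim_ definition above) =====
theorem max_matching_spec : Claim_equal_max_matching := by
  intro sequence _
  unfold Spec_max_matching max_matching max_matching_alt
  rw [fold_counts, pvBCounts_eq]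
  simp
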